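-- pv_equiv track=rewrite | github.com/Ferrari25/ParserASDPpy | Automatas.py | automata_finfunc
-- ===== SOURCE A (Python) =====
-- ESTADO_FINAL = "ESTADO FINAL"
--
-- ESTADO_NO_FINAL = "NO ACEPTADO"
--
-- ESTADO_TRAMPA = "EN ESTADO TRAMPA"
--
-- def automata_finfunc(lexema):
--         estadoactual=0
--         estadosfinales=[7]
--         for vcarac in lexema:
--             if estadoactual==0 and vcarac=='f':
--                 estadoactual= 1
--             elif estadoactual==1 and vcarac=='i':
--                 estadoactual=2
--             elif estadoactual==2 and vcarac=='n':
--                 estadoactual=3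
--             elif estadoactual==3 and vcarac=='f':
--                 estadoactual=4
--             elif estadoactual==4 and vcarac=='u':
--                 estadoactual=5
--             elif estadoactual==5 and vcarac=='n':
--                 estadoactual=6
--             elif estadoactual==6 and vcarac=='c':
--                 estadoactual=7
--             else:
--                 estadoactual=-1
--                 break
--         if estadoactual == -1:
--              return ESTADO_TRAMPA
--         if estadoactual in estadosfinales:
--             return ESTADO_FINAL
--         else:
--             return ESTADO_NO_FINAL
-- ===== SOURCE B (Python) =====
-- ESTADO_FINAL = "ESTADO FINAL"
--
-- ESTADO_NO_FINAL = "NO ACEPTADO"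
--
-- ESTADO_TRAMPA = "EN ESTADO TRAMPA"
--
-- def automata_finfunc(lexema):
--     target = "finfunc"
--     if lexema == target:
--         return ESTADO_FINAL
--     if target.startswith(lexema):
--         return ESTADO_NO_FINAL
--     return ESTADO_TRAMPA
-- ===== Notes on version B (the rewrite author's own statement) =====
-- stated objective: simpler
-- what changed: Replaces the 8-state DFA loop with a closed-form string test: exact match gives ESTADO_FINAL, a proper prefix of 'finfunc' (via startswith) gives NO ACEPTADO, anything else EN ESTADO TRAMPA.
import Mathlib
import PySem

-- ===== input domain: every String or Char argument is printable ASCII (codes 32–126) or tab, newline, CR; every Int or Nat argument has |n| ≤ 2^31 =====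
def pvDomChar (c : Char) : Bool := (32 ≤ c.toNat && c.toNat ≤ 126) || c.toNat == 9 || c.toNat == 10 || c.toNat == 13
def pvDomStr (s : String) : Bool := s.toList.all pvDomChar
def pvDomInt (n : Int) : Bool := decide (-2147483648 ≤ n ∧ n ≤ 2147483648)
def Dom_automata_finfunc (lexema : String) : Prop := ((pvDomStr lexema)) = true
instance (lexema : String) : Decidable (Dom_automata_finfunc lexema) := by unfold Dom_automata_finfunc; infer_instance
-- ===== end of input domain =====

-- B replaces the 8-state DFA loop with a closed-form test against the literal "finfunc" (objective: simpler).

-- ===== PORT A =====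
-- the if/elif chain of A's loop body (the final else sets -1, the break is the -1 test in runA)
def stepA (estadoactual : Int) (vcarac : Char) : Int :=
  if estadoactual = 0 ∧ vcarac = 'f' then 1
  else if estadoactual = 1 ∧ vcarac = 'i' then 2
  else if estadoactual = 2 ∧ vcarac = 'n' then 3
  else if estadoactual = 3 ∧ vcarac = 'f' then 4
  else if estadoactual = 4 ∧ vcarac = 'u' then 5
  else if estadoactual = 5 ∧ vcarac = 'n' then 6
  else if estadoactual = 6 ∧ vcarac = 'c' then 7
  else -1

-- the for-loop with its break
def runA : Int → List Char → Int
  | s, [] => s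
  | s, c :: rest =>
      let s' := stepA s c
      if s' = -1 then -1 else runA s' rest

def automata_finfunc (lexema : String) : String :=
  let estadosfinales : List Int := [7]
  let estadoactual := runA 0 lexema.toList
  if estadoactual = -1 then "EN ESTADO TRAMPA"
  else if estadoactual ∈ estadosfinales then "ESTADO FINAL"
  else "NO ACEPTADO"

-- ===== PORT B =====
def automata_finfunc_alt (lexema : String) : String :=
  let target := "finfunc"
  if lexema = target then "ESTADO FINAL"
  else if PySem.Str.startswith target lexema then "NO ACEPTADO"
  else "EN ESTADO TRAMPA"

-- ===== PRECONDITION & SPEC =====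
def Spec_automata_finfunc (lexema : String) (out : String) : Prop := out = automata_finfunc_alt lexema
instance (lexema : String) (out : String) : Decidable (Spec_automata_finfunc lexema out) := by unfold Spec_automata_finfunc; infer_instance

-- ===== CLAIM (what is proved, stated in full; the proofs are below) =====
def Claim_equal_automata_finfunc : Prop := ∀ (lexema : String), Dom_automata_finfunc lexema → Spec_automata_finfunc lexema (automata_finfunc lexema)

-- ===== LEMMAS AND PROOFS =====
def pvTgt : List Char := ['f', 'i', 'n', 'f', 'u', 'n', 'c']

theorem stepA_eq (n : ℕ) (hn : n < 7) (c : Char) :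
    stepA (n : Int) c = if c = pvTgt[n]! then (((n + 1 : ℕ)) : Int) else -1 := by
  interval_cases n <;> norm_num [stepA, pvTgt]

theorem runA_eq (l : List Char) : ∀ (n : ℕ), n ≤ 7 →
    runA (n : Int) l = if l <+: pvTgt.drop n then ((n : Int) + l.length) else -1 := by
  induction l with
  | nil => intro n _; simp [runA]
  | cons c rest ih =>
    intro n hn
    rcases Nat.lt_or_ge n 7 with h7 | h7
    · have hdrop : pvTgt.drop n = pvTgt[n]! :: pvTgt.drop (n + 1) := by
        rw [getElem!_pos pvTgt n (by simpa [pvTgt] using h7)]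
        exact (List.getElem_cons_drop (by simpa [pvTgt] using h7)).symm
      show (if stepA (n : Int) c = -1 then -1 else runA (stepA (n : Int) c) rest) = _
      rw [stepA_eq n h7 c, hdrop]
      by_cases hc : c = pvTgt[n]!
      · have hne : ¬(((n + 1 : ℕ) : Int) = -1) := by omega
        rw [if_pos hc, if_neg hne, ih (n + 1) (by omega)]
        simp only [hc, List.cons_prefix_cons, true_and]
        split
        · simp only [List.length_cons]; push_cast; ring
        · rfl
      · rw [if_neg hc, if_pos rfl]
        rw [if_neg (fun h => hc (List.cons_prefix_cons.mp h).1)]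
    · have hn7 : n = 7 := by omega
      subst hn7
      have : pvTgt.drop 7 = [] := by decide
      rw [this]
      have : ¬((c :: rest) <+: ([] : List Char)) := by simp
      rw [if_neg this]
      show (if stepA 7 c = -1 then -1 else runA (stepA 7 c) rest) = -1
      norm_num [stepA]

-- ===== VERDICT (by name: the statement is the Claim_ definition above) =====
theorem automata_finfunc_spec : Claim_equal_automata_finfunc := by
  intro lexema _
  unfold Spec_automata_finfunc automata_finfunc automata_finfunc_alt
  have h0 := runA_eq lexema.toList 0 (by norm_num)
  simp only [Nat.cast_zero, List.drop_zero, zero_add] at h0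
  have htl : ("finfunc" : String).toList = pvTgt := by decide
  have hswc : PySem.Str.startswith "finfunc" lexema = true ↔ lexema.toList <+: pvTgt := by
    rw [PySem.Str.startswith_eq, htl, PySem.Chars.startswith_iff]
  have heq : lexema = "finfunc" ↔ lexema.toList = pvTgt := by
    rw [← htl]; exact ⟨fun h => by rw [h], String.toList_inj.mp⟩
  rw [h0]
  by_cases hp : lexema.toList <+: pvTgt
  · by_cases h7 : lexema.toList.length = 7
    · have he : lexema = "finfunc" := heq.mpr (hp.eq_of_length (by simp [pvTgt, h7]))
      simp only [if_pos hp, if_pos he, h7]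
      norm_num
    · have hne : ¬ lexema = "finfunc" := fun h => h7 (by simp [heq.mp h, pvTgt])
      have hb : PySem.Str.startswith "finfunc" lexema = true := hswc.mpr hp
      have hlen : ¬ ((lexema.toList.length : Int) = -1) := by omega
      have hmem : ¬ ((lexema.toList.length : Int) ∈ ([7] : List Int)) := by
        simp only [List.mem_singleton]; omega
      simp only [if_pos hp, if_neg hne, if_neg hlen, if_neg hmem, hb, if_true]
  · have hne : ¬ lexema = "finfunc" := fun h => hp (heq.mp h ▸ List.prefix_refl _)
    have hb : PySem.Str.startswith "finfunc" lexema = false := by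
      rw [← Bool.not_eq_true]; exact fun h => hp (hswc.mp h)
    simp only [if_neg hp, if_neg hne, hb, Bool.false_eq_true, if_false]
    norm_num
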